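-- pv_equiv track=rewrite | github.com/AbdulRahmanAzam/salesai | src/prospecting_agent/sources/apollo.py | _normalize_employee_ranges
-- ===== SOURCE A (Python) =====
-- _APOLLO_RANGES = [
--     (1, 10), (11, 20), (21, 50), (51, 100), (101, 200),
--     (201, 500), (501, 1000), (1001, 2000), (2001, 5000),
--     (5001, 10000),
-- ]
--
-- def _normalize_employee_ranges(raw_ranges: list[str]) -> list[str]:
--     """Map ICP employee ranges (e.g. '10,200') to Apollo's standard buckets."""
--     result: set[str] = set()
--     for r in raw_ranges:
--         parts = r.replace("-", ",").split(",")
--         try: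
--             lo = int(parts[0].strip())
--             hi = int(parts[1].strip()) if len(parts) > 1 else lo
--         except (ValueError, IndexError):
--             continue
--         for a_lo, a_hi in _APOLLO_RANGES:
--             if a_hi >= lo and a_lo <= hi:
--                 result.add(f"{a_lo},{a_hi}")
--     return sorted(result) if result else ["1,10", "11,20", "21,50", "51,100", "101,200"]
-- ===== SOURCE B (Python) =====
-- # Bitmask + binary search over the fixed bucket boundaries; output emitted from a
-- # precomputed lexicographic table, so no runtime set or sort is needed.
--
-- _LOWS  = [1, 11, 21, 51, 101, 201, 501, 1001, 2001, 5001]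
-- _HIGHS = [10, 20, 50, 100, 200, 500, 1000, 2000, 5000, 10000]
--
-- # the ten bucket strings, precomputed in lexicographic (sorted) order with their index
-- _LEX = [
--     (0, "1,10"), (7, "1001,2000"), (4, "101,200"), (1, "11,20"),
--     (8, "2001,5000"), (5, "201,500"), (2, "21,50"), (9, "5001,10000"),
--     (6, "501,1000"), (3, "51,100"),
-- ]
--
--
-- def _bisect_left(a, x):
--     lo, hi = 0, len(a)
--     while lo < hi:
--         mid = (lo + hi) // 2
--         if a[mid] < x:
--             lo = mid + 1
--         else:
--             hi = mid
--     return lo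
--
--
-- def _bisect_right(a, x):
--     lo, hi = 0, len(a)
--     while lo < hi:
--         mid = (lo + hi) // 2
--         if a[mid] <= x:
--             lo = mid + 1
--         else:
--             hi = mid
--     return lo
--
--
-- def _normalize_employee_ranges(raw_ranges: list[str]) -> list[str]:
--     """Map ICP employee ranges (e.g. '10,200') to Apollo's standard buckets."""
--     covered = 0
--     for r in raw_ranges:
--         parts = r.replace("-", ",").split(",")
--         try:
--             lo = int(parts[0].strip())
--             hi = int(parts[1].strip()) if len(parts) > 1 else lo
--         except (ValueError, IndexError):
--             continue
--         start = _bisect_left(_HIGHS, lo)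
--         stop = _bisect_right(_LOWS, hi)
--         for i in range(start, stop):
--             covered |= 1 << i
--     if covered == 0:
--         return ["1,10", "11,20", "21,50", "51,100", "101,200"]
--     return [s for i, s in _LEX if covered >> i & 1]
-- ===== Notes on version B (the rewrite author's own statement) =====
-- stated objective: alternative
-- what changed: Replaces A's per-string linear scan over all ten buckets and the runtime set+sort with a bit mask updated via binary search on the fixed bucket boundaries, emitting the result from a precomputed lexicographically-ordered table.
import Mathlib
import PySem

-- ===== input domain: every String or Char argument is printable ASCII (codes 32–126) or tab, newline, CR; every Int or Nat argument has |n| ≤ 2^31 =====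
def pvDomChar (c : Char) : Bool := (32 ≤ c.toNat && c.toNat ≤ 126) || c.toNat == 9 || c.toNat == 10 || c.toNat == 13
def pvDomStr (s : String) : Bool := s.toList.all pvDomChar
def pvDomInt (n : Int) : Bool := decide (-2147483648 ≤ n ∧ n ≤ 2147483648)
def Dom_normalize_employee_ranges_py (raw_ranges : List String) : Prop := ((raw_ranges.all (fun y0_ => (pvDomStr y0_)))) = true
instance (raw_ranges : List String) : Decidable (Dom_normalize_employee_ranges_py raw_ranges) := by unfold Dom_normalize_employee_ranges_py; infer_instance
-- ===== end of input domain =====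

-- B replaces A's per-string scan over all ten buckets and the runtime set+sort by a bit mask,
-- binary search on the fixed bucket boundaries, and a precomputed lexicographic emission table
-- (objective: alternative decomposition; same return value).

-- ===== PORT A =====
def pvApolloRanges : List (Int × Int) :=
  [(1, 10), (11, 20), (21, 50), (51, 100), (101, 200),
   (201, 500), (501, 1000), (1001, 2000), (2001, 5000),
   (5001, 10000)]

-- parts = r.replace("-", ",").split(","); lo = int(parts[0].strip()); hi = int(parts[1].strip()) if len(parts) > 1 else lo
-- (none = the ValueError/IndexError the 'except' turns into 'continue')
def pvParseA (r : String) : Option (Int × Int) :=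
  -- r.replace("-", ",").split(","): sep "," ≠ "" so split? is always some
  let parts := (PySem.Str.split? (PySem.Str.replace r "-" ",") ",").getD []
  match PySem.List.pyGet? parts 0 with
  | none => none
  | some p0 =>
    match PySem.Int.ofStr? (PySem.Str.strip p0) with
    | none => none
    | some lo =>
      if parts.length > 1 then
        match PySem.List.pyGet? parts 1 with
        | none => none
        | some p1 =>
          match PySem.Int.ofStr? (PySem.Str.strip p1) with
          | none => none
          | some hi => some (lo, hi)
      else some (lo, lo)

def pvStepA (res : PySem.Set String) (r : String) : PySem.Set String :=
  match pvParseA r with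
  | none => res
  | some (lo, hi) =>
    pvApolloRanges.foldl (fun res p =>
      if lo ≤ p.2 ∧ p.1 ≤ hi then
        PySem.Set.add res (PySem.Int.toStr p.1 ++ "," ++ PySem.Int.toStr p.2)
      else res) res

def normalize_employee_ranges_py (raw_ranges : List String) : List String :=
  let result : PySem.Set String := raw_ranges.foldl pvStepA PySem.Set.empty
  if result ≠ [] then PySem.List.sorted result (fun x => x) false
  else ["1,10", "11,20", "21,50", "51,100", "101,200"]

-- ===== PORT B =====
def pvLows : List Int := [1, 11, 21, 51, 101, 201, 501, 1001, 2001, 5001]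
def pvHighs : List Int := [10, 20, 50, 100, 200, 500, 1000, 2000, 5000, 10000]

-- the ten bucket strings precomputed in lexicographic order, paired with their bucket index
def pvLex : List (Nat × String) :=
  [(0, "1,10"), (7, "1001,2000"), (4, "101,200"), (1, "11,20"),
   (8, "2001,5000"), (5, "201,500"), (2, "21,50"), (9, "5001,10000"),
   (6, "501,1000"), (3, "51,100")]

-- _bisect_left: a.getD mid 0 is a[mid] (0 ≤ mid < len(a) whenever the loop body runs)
def pvBisectLeft (a : List Int) (x : Int) (lo hi : Nat) : Nat :=
  if lo < hi then
    let mid := (lo + hi) / 2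
    if a.getD mid 0 < x then pvBisectLeft a x (mid + 1) hi else pvBisectLeft a x lo mid
  else lo
termination_by hi - lo
decreasing_by all_goals omega

-- _bisect_right
def pvBisectRight (a : List Int) (x : Int) (lo hi : Nat) : Nat :=
  if lo < hi then
    let mid := (lo + hi) / 2
    if a.getD mid 0 ≤ x then pvBisectRight a x (mid + 1) hi else pvBisectRight a x lo mid
  else lo
termination_by hi - lo
decreasing_by all_goals omega

-- the same parsing block as A's (identical Python code in Source B)
def pvParseB (r : String) : Option (Int × Int) :=
  -- r.replace("-", ",").split(","): sep "," ≠ "" so split? is always some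
  let parts := (PySem.Str.split? (PySem.Str.replace r "-" ",") ",").getD []
  match PySem.List.pyGet? parts 0 with
  | none => none
  | some p0 =>
    match PySem.Int.ofStr? (PySem.Str.strip p0) with
    | none => none
    | some lo =>
      if parts.length > 1 then
        match PySem.List.pyGet? parts 1 with
        | none => none
        | some p1 =>
          match PySem.Int.ofStr? (PySem.Str.strip p1) with
          | none => none
          | some hi => some (lo, hi)
      else some (lo, lo)

def pvStepB (c : Nat) (r : String) : Nat :=
  match pvParseB r with
  | none => c
  | some (lo, hi) =>
    let start := pvBisectLeft pvHighs lo 0 pvHighs.length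
    let stop := pvBisectRight pvLows hi 0 pvLows.length
    (List.range' start (stop - start)).foldl (fun c i => c ||| (1 <<< i)) c

def normalize_employee_ranges_py_alt (raw_ranges : List String) : List String :=
  let covered : Nat := raw_ranges.foldl pvStepB 0
  if covered = 0 then ["1,10", "11,20", "21,50", "51,100", "101,200"]
  else (pvLex.filter (fun p => (covered >>> p.1) &&& 1 == 1)).map (fun p => p.2)

-- ===== PRECONDITION & SPEC =====
def Spec_normalize_employee_ranges_py (raw_ranges : List String) (out : List String) : Prop := out = normalize_employee_ranges_py_alt raw_ranges
instance (raw_ranges : List String) (out : List String) : Decidable (Spec_normalize_employee_ranges_py raw_ranges out) := by unfold Spec_normalize_employee_ranges_py; infer_instance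

-- ===== CLAIM (what is proved, stated in full; the proofs are below) =====
def Claim_equal_normalize_employee_ranges_py : Prop := ∀ (raw_ranges : List String), Dom_normalize_employee_ranges_py raw_ranges → Spec_normalize_employee_ranges_py raw_ranges (normalize_employee_ranges_py raw_ranges)

-- ===== LEMMAS AND PROOFS =====

def pvBucket (i : Nat) : String :=
  ["1,10", "11,20", "21,50", "51,100", "101,200",
   "201,500", "501,1000", "1001,2000", "2001,5000", "5001,10000"].getD i ""

theorem pvParse_eq : pvParseA = pvParseB := rfl

theorem pvGetD_mono {a : List Int} (ha : a.Pairwise (· ≤ ·)) {i j : Nat}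
    (hij : i ≤ j) (hj : j < a.length) : a.getD i 0 ≤ a.getD j 0 := by
  rcases Nat.lt_or_ge i j with h | h
  · rw [List.getD_eq_getElem a 0 (by omega), List.getD_eq_getElem a 0 hj]
    exact (List.pairwise_iff_getElem.mp ha) i j (by omega) hj h
  · have : i = j := by omega
    subst this; rfl

theorem pvBisectLeft_spec (a : List Int) (x : Int) (ha : a.Pairwise (· ≤ ·)) :
    ∀ n lo hi, hi - lo ≤ n → lo ≤ hi → hi ≤ a.length →
    (∀ j, j < lo → a.getD j 0 < x) →
    (∀ j, hi ≤ j → j < a.length → ¬ a.getD j 0 < x) →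
    lo ≤ pvBisectLeft a x lo hi ∧ pvBisectLeft a x lo hi ≤ hi ∧
    (∀ j, j < pvBisectLeft a x lo hi → a.getD j 0 < x) ∧
    (∀ j, pvBisectLeft a x lo hi ≤ j → j < a.length → ¬ a.getD j 0 < x) := by
  intro n
  induction n with
  | zero =>
    intro lo hi h1 h2 h3 h4 h5
    have hh : ¬ lo < hi := by omega
    rw [pvBisectLeft, if_neg hh]
    exact ⟨le_refl _, h2, h4, fun j hj hjl => h5 j (by omega) hjl⟩
  | succ n ih =>
    intro lo hi h1 h2 h3 h4 h5
    by_cases hlt : lo < hi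
    · rw [pvBisectLeft, if_pos hlt]
      dsimp only
      by_cases hc : a.getD ((lo + hi) / 2) 0 < x
      · rw [if_pos hc]
        have := ih ((lo + hi) / 2 + 1) hi (by omega) (by omega) h3
          (fun j hj => by
            rcases Nat.lt_or_ge j lo with h | h
            · exact h4 j h
            · exact lt_of_le_of_lt (pvGetD_mono ha (by omega) (by omega)) hc)
          h5
        exact ⟨by omega, this.2⟩
      · rw [if_neg hc]
        have := ih lo ((lo + hi) / 2) (by omega) (by omega) (by omega) h4
          (fun j hj hjl => by
            intro habs
            exact hc (lt_of_le_of_lt (pvGetD_mono ha (by omega) hjl) habs))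
        exact ⟨this.1, by omega, this.2.2⟩
    · rw [pvBisectLeft, if_neg hlt]
      exact ⟨le_refl _, h2, h4, fun j hj hjl => h5 j (by omega) hjl⟩

theorem pvBisectRight_spec (a : List Int) (x : Int) (ha : a.Pairwise (· ≤ ·)) :
    ∀ n lo hi, hi - lo ≤ n → lo ≤ hi → hi ≤ a.length →
    (∀ j, j < lo → a.getD j 0 ≤ x) →
    (∀ j, hi ≤ j → j < a.length → ¬ a.getD j 0 ≤ x) →
    lo ≤ pvBisectRight a x lo hi ∧ pvBisectRight a x lo hi ≤ hi ∧
    (∀ j, j < pvBisectRight a x lo hi → a.getD j 0 ≤ x) ∧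
    (∀ j, pvBisectRight a x lo hi ≤ j → j < a.length → ¬ a.getD j 0 ≤ x) := by
  intro n
  induction n with
  | zero =>
    intro lo hi h1 h2 h3 h4 h5
    have hh : ¬ lo < hi := by omega
    rw [pvBisectRight, if_neg hh]
    exact ⟨le_refl _, h2, h4, fun j hj hjl => h5 j (by omega) hjl⟩
  | succ n ih =>
    intro lo hi h1 h2 h3 h4 h5
    by_cases hlt : lo < hi
    · rw [pvBisectRight, if_pos hlt]
      dsimp only
      by_cases hc : a.getD ((lo + hi) / 2) 0 ≤ x
      · rw [if_pos hc]
        have := ih ((lo + hi) / 2 + 1) hi (by omega) (by omega) h3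
          (fun j hj => by
            rcases Nat.lt_or_ge j lo with h | h
            · exact h4 j h
            · exact le_trans (pvGetD_mono ha (by omega) (by omega)) hc)
          h5
        exact ⟨by omega, this.2⟩
      · rw [if_neg hc]
        have := ih lo ((lo + hi) / 2) (by omega) (by omega) (by omega) h4
          (fun j hj hjl => by
            intro habs
            exact hc (le_trans (pvGetD_mono ha (by omega) hjl) habs))
        exact ⟨this.1, by omega, this.2.2⟩
    · rw [pvBisectRight, if_neg hlt]
      exact ⟨le_refl _, h2, h4, fun j hj hjl => h5 j (by omega) hjl⟩

theorem pvHighs_pw : pvHighs.Pairwise (· ≤ ·) := by decide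
theorem pvLows_pw : pvLows.Pairwise (· ≤ ·) := by decide

theorem pvStartSpec (x : Int) :
    pvBisectLeft pvHighs x 0 pvHighs.length ≤ 10 ∧
    (∀ j, j < pvBisectLeft pvHighs x 0 pvHighs.length → pvHighs.getD j 0 < x) ∧
    (∀ j, pvBisectLeft pvHighs x 0 pvHighs.length ≤ j → j < 10 → ¬ pvHighs.getD j 0 < x) := by
  have h := pvBisectLeft_spec pvHighs x pvHighs_pw 10 0 pvHighs.length (by decide) (by decide)
    (by decide) (by omega) (fun j hj hjl => absurd hjl (by omega))
  exact ⟨h.2.1, h.2.2.1, fun j h1 h2 => h.2.2.2 j h1 (by exact h2)⟩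

theorem pvStopSpec (x : Int) :
    pvBisectRight pvLows x 0 pvLows.length ≤ 10 ∧
    (∀ j, j < pvBisectRight pvLows x 0 pvLows.length → pvLows.getD j 0 ≤ x) ∧
    (∀ j, pvBisectRight pvLows x 0 pvLows.length ≤ j → j < 10 → ¬ pvLows.getD j 0 ≤ x) := by
  have h := pvBisectRight_spec pvLows x pvLows_pw 10 0 pvLows.length (by decide) (by decide)
    (by decide) (by omega) (fun j hj hjl => absurd hjl (by omega))
  exact ⟨h.2.1, h.2.2.1, fun j h1 h2 => h.2.2.2 j h1 (by exact h2)⟩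

theorem pvStart_le_iff (x : Int) (i : Nat) (hi : i < 10) :
    pvBisectLeft pvHighs x 0 pvHighs.length ≤ i ↔ x ≤ pvHighs.getD i 0 := by
  obtain ⟨h1, h2, h3⟩ := pvStartSpec x
  constructor
  · intro h
    have := h3 i h hi
    omega
  · intro h
    by_contra hlt
    have := h2 i (by omega)
    omega

theorem pvLt_stop_iff (x : Int) (i : Nat) (hi : i < 10) :
    i < pvBisectRight pvLows x 0 pvLows.length ↔ pvLows.getD i 0 ≤ x := by
  obtain ⟨h1, h2, h3⟩ := pvStopSpec x
  constructor
  · intro h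
    exact h2 i h
  · intro h
    by_contra hge
    have := h3 i (by omega) hi
    omega

theorem pvTestBit_one_shift (i j : Nat) : (1 <<< i).testBit j = decide (j = i) := by
  rw [Nat.one_shiftLeft, Nat.testBit_two_pow]; simp [eq_comm]

theorem pvTestBit_foldl_or (l : List Nat) (c j : Nat) :
    (((l.foldl (fun c i => c ||| (1 <<< i)) c).testBit j) = true) ↔
      (c.testBit j = true ∨ j ∈ l) := by
  induction l generalizing c with
  | nil => simp
  | cons i t ih =>
    have hb : (c ||| 1 <<< i).testBit j = (c.testBit j || decide (j = i)) := by
      rw [Nat.testBit_or, pvTestBit_one_shift]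
    simp only [List.foldl_cons, ih, hb, List.mem_cons, Bool.or_eq_true, decide_eq_true_eq]
    tauto

theorem pvShiftAnd (c i : Nat) : ((c >>> i) &&& 1 == 1) = c.testBit i := by
  simp [Nat.testBit, Nat.and_comm]

theorem pvMem_foldl_add_if {α : Type} (l : List α) (P : α → Prop) [DecidablePred P]
    (g : α → String) :
    ∀ (s : List String) (str : String),
      str ∈ l.foldl (fun s p => if P p then PySem.Set.add s (g p) else s) s ↔
      str ∈ s ∨ ∃ p, p ∈ l ∧ P p ∧ str = g p := by
  induction l with
  | nil => simp
  | cons p t ih =>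
    intro s str
    simp only [List.foldl_cons, List.mem_cons]
    by_cases hp : P p
    · rw [if_pos hp, ih, PySem.Set.mem_add]
      constructor
      · rintro ((h | rfl) | ⟨q, hq, hPq, rfl⟩)
        · tauto
        · exact Or.inr ⟨p, Or.inl rfl, hp, rfl⟩
        · exact Or.inr ⟨q, Or.inr hq, hPq, rfl⟩
      · rintro (h | ⟨q, (rfl | hq), hPq, rfl⟩)
        · tauto
        · exact Or.inl (Or.inr rfl)
        · exact Or.inr ⟨q, hq, hPq, rfl⟩
    · rw [if_neg hp, ih]
      constructor
      · rintro (h | ⟨q, hq, hPq, rfl⟩)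
        · tauto
        · exact Or.inr ⟨q, Or.inr hq, hPq, rfl⟩
      · rintro (h | ⟨q, (rfl | hq), hPq, rfl⟩)
        · tauto
        · exact absurd hPq hp
        · exact Or.inr ⟨q, hq, hPq, rfl⟩

theorem pvNodup_foldl_add_if {α : Type} (l : List α) (P : α → Prop) [DecidablePred P]
    (g : α → String) :
    ∀ (s : List String), s.Nodup →
      (l.foldl (fun s p => if P p then PySem.Set.add s (g p) else s) s).Nodup := by
  induction l with
  | nil => intro s hs; simpa
  | cons p t ih =>
    intro s hs
    simp only [List.foldl_cons]
    by_cases hp : P p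
    · rw [if_pos hp]; exact ih _ (PySem.Set.nodup_add s (g p) hs)
    · rw [if_neg hp]; exact ih _ hs

theorem pvEntries (i : Nat) (h : i < 10) :
    (pvApolloRanges.getD i (0, 0)).1 = pvLows.getD i 0 ∧
    (pvApolloRanges.getD i (0, 0)).2 = pvHighs.getD i 0 ∧
    (PySem.Int.toStr (pvApolloRanges.getD i (0, 0)).1 ++ "," ++
      PySem.Int.toStr (pvApolloRanges.getD i (0, 0)).2) = pvBucket i := by
  interval_cases i <;> exact ⟨rfl, rfl, rfl⟩

theorem pvExists_pair (lo hi : Int) (str : String) :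
    (∃ p, p ∈ pvApolloRanges ∧ (lo ≤ p.2 ∧ p.1 ≤ hi) ∧
      str = PySem.Int.toStr p.1 ++ "," ++ PySem.Int.toStr p.2) ↔
    (∃ i, i < 10 ∧ (lo ≤ pvHighs.getD i 0 ∧ pvLows.getD i 0 ≤ hi) ∧ str = pvBucket i) := by
  constructor
  · rintro ⟨p, hp, hP, rfl⟩
    obtain ⟨i, hlen, hpi⟩ := List.mem_iff_getElem.mp hp
    have hi10 : i < 10 := by simpa [pvApolloRanges] using hlen
    have hgd : pvApolloRanges.getD i (0, 0) = p := by
      rw [List.getD_eq_getElem _ _ hlen]; exact hpi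
    obtain ⟨e1, e2, e3⟩ := pvEntries i hi10
    rw [← hgd] at hP ⊢
    exact ⟨i, hi10, by rw [← e1, ← e2]; exact hP, e3⟩
  · rintro ⟨i, hi10, hP, rfl⟩
    obtain ⟨e1, e2, e3⟩ := pvEntries i hi10
    have hlen : i < pvApolloRanges.length := by simpa [pvApolloRanges] using hi10
    refine ⟨pvApolloRanges.getD i (0, 0), ?_, ?_, e3.symm⟩
    · rw [List.getD_eq_getElem _ _ hlen]; exact List.getElem_mem hlen
    · rw [e1, e2]; exact hP

def pvInv (c : Nat) (s : List String) : Prop :=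
  s.Nodup ∧ (∀ j, c.testBit j = true → j < 10) ∧
  (∀ str, str ∈ s ↔ ∃ i, i < 10 ∧ c.testBit i = true ∧ str = pvBucket i)

theorem pvStep_inv (c : Nat) (s : List String) (r : String) (h : pvInv c s) :
    pvInv (pvStepB c r) (pvStepA s r) := by
  obtain ⟨hnd, hbound, hmem⟩ := h
  rw [pvStepA, pvStepB, ← pvParse_eq]
  cases hp : pvParseA r with
  | none => exact ⟨hnd, hbound, hmem⟩
  | some p =>
    obtain ⟨lo, hi⟩ := p
    dsimp only
    obtain ⟨hstartle, _, _⟩ := pvStartSpec lo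
    obtain ⟨hstople, _, _⟩ := pvStopSpec hi
    refine ⟨pvNodup_foldl_add_if _ _ _ s hnd, ?_, ?_⟩
    · intro j hj
      rcases (pvTestBit_foldl_or _ c j).mp hj with h | h
      · exact hbound j h
      · have := List.mem_range'_1.mp h
        omega
    · intro str
      rw [pvMem_foldl_add_if pvApolloRanges (fun p => lo ≤ p.2 ∧ p.1 ≤ hi)
        (fun p => PySem.Int.toStr p.1 ++ "," ++ PySem.Int.toStr p.2) s str,
        hmem str, pvExists_pair lo hi str]
      constructor
      · rintro (⟨i, hi10, hb, rfl⟩ | ⟨i, hi10, hP, rfl⟩)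
        · exact ⟨i, hi10, (pvTestBit_foldl_or _ c i).mpr (Or.inl hb), rfl⟩
        · refine ⟨i, hi10, (pvTestBit_foldl_or _ c i).mpr (Or.inr ?_), rfl⟩
          rw [List.mem_range'_1]
          have h1 := (pvStart_le_iff lo i hi10).mpr hP.1
          have h2 := (pvLt_stop_iff hi i hi10).mpr hP.2
          omega
      · rintro ⟨i, hi10, hb, rfl⟩
        rcases (pvTestBit_foldl_or _ c i).mp hb with h | h
        · exact Or.inl ⟨i, hi10, h, rfl⟩
        · have hr := List.mem_range'_1.mp h
          refine Or.inr ⟨i, hi10, ⟨?_, ?_⟩, rfl⟩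
          · exact (pvStart_le_iff lo i hi10).mp (by omega)
          · exact (pvLt_stop_iff hi i hi10).mp (by omega)

theorem pvFold_inv (rs : List String) :
    ∀ c s, pvInv c s → pvInv (rs.foldl pvStepB c) (rs.foldl pvStepA s) := by
  induction rs with
  | nil => intro c s h; exact h
  | cons r t ih =>
    intro c s h
    simp only [List.foldl_cons]
    exact ih _ _ (pvStep_inv c s r h)

theorem pvLex_entries : pvLex.Pairwise (fun a b => a.2 < b.2) ∧ (pvLex.map (fun p => p.2)).Nodup :=
  ⟨List.Pairwise.imp (fun h => String.lt_iff_toList_lt.mpr h)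
    (show pvLex.Pairwise (fun a b => a.2.toList < b.2.toList) by decide), by decide⟩

theorem pvMem_lex (c : Nat) (str : String) :
    (str ∈ (pvLex.filter (fun p => (c >>> p.1) &&& 1 == 1)).map (fun p => p.2)) ↔
    (∃ i, i < 10 ∧ c.testBit i = true ∧ str = pvBucket i) := by
  rw [List.mem_map]
  constructor
  · rintro ⟨p, hp, rfl⟩
    rw [List.mem_filter, pvShiftAnd] at hp
    obtain ⟨hpl, hf⟩ := hp
    simp only [pvLex, List.mem_cons, List.not_mem_nil, or_false] at hpl
    rcases hpl with rfl | rfl | rfl | rfl | rfl | rfl | rfl | rfl | rfl | rfl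
    exacts [⟨0, by omega, hf, rfl⟩, ⟨7, by omega, hf, rfl⟩, ⟨4, by omega, hf, rfl⟩,
      ⟨1, by omega, hf, rfl⟩, ⟨8, by omega, hf, rfl⟩, ⟨5, by omega, hf, rfl⟩,
      ⟨2, by omega, hf, rfl⟩, ⟨9, by omega, hf, rfl⟩, ⟨6, by omega, hf, rfl⟩,
      ⟨3, by omega, hf, rfl⟩]
  · rintro ⟨i, hi10, hb, rfl⟩
    interval_cases i
    exacts [⟨(0, "1,10"), by rw [List.mem_filter, pvShiftAnd]; exact ⟨by decide, hb⟩, rfl⟩,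
      ⟨(1, "11,20"), by rw [List.mem_filter, pvShiftAnd]; exact ⟨by decide, hb⟩, rfl⟩,
      ⟨(2, "21,50"), by rw [List.mem_filter, pvShiftAnd]; exact ⟨by decide, hb⟩, rfl⟩,
      ⟨(3, "51,100"), by rw [List.mem_filter, pvShiftAnd]; exact ⟨by decide, hb⟩, rfl⟩,
      ⟨(4, "101,200"), by rw [List.mem_filter, pvShiftAnd]; exact ⟨by decide, hb⟩, rfl⟩,
      ⟨(5, "201,500"), by rw [List.mem_filter, pvShiftAnd]; exact ⟨by decide, hb⟩, rfl⟩,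
      ⟨(6, "501,1000"), by rw [List.mem_filter, pvShiftAnd]; exact ⟨by decide, hb⟩, rfl⟩,
      ⟨(7, "1001,2000"), by rw [List.mem_filter, pvShiftAnd]; exact ⟨by decide, hb⟩, rfl⟩,
      ⟨(8, "2001,5000"), by rw [List.mem_filter, pvShiftAnd]; exact ⟨by decide, hb⟩, rfl⟩,
      ⟨(9, "5001,10000"), by rw [List.mem_filter, pvShiftAnd]; exact ⟨by decide, hb⟩, rfl⟩]

-- ===== VERDICT (by name: the statement is the Claim_ definition above) =====
theorem normalize_employee_ranges_py_spec : Claim_equal_normalize_employee_ranges_py := by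
  unfold Claim_equal_normalize_employee_ranges_py
  intro rs _
  unfold Spec_normalize_employee_ranges_py normalize_employee_ranges_py normalize_employee_ranges_py_alt
  simp only [PySem.Set.empty]
  have hinv : pvInv (rs.foldl pvStepB 0) (rs.foldl pvStepA []) := by
    refine pvFold_inv rs 0 [] ⟨?_, ?_, ?_⟩
    · exact List.nodup_nil
    · intro j hj; rw [Nat.zero_testBit] at hj; exact absurd hj (by simp)
    · intro str
      simp [Nat.zero_testBit]
  obtain ⟨hnd, hbound, hmem⟩ := hinv
  by_cases hc : rs.foldl pvStepB 0 = 0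
  · have hs : rs.foldl pvStepA [] = [] := by
      rw [List.eq_nil_iff_forall_not_mem]
      intro str hstr
      obtain ⟨i, _, hb, _⟩ := (hmem str).mp hstr
      rw [hc, Nat.zero_testBit] at hb
      exact absurd hb (by simp)
    rw [if_neg (by simp [hs]), if_pos hc]
  · have hex : ∃ i, (rs.foldl pvStepB 0).testBit i = true := by
      by_contra hall
      refine hc (Nat.eq_of_testBit_eq fun i => ?_)
      cases hb : (rs.foldl pvStepB 0).testBit i with
      | false => rw [Nat.zero_testBit]
      | true => exact absurd ⟨i, hb⟩ hall
    obtain ⟨i, hbi⟩ := hex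
    have hsne : rs.foldl pvStepA [] ≠ [] :=
      List.ne_nil_of_mem ((hmem _).mpr ⟨i, hbound i hbi, hbi, rfl⟩)
    rw [if_pos hsne, if_neg hc]
    apply PySem.List.sorted_eq_of_perm_of_pairwise_lt
    · refine (List.perm_ext_iff_of_nodup ?_ hnd).mpr ?_
      · exact ((pvLex_entries.2).sublist (List.Sublist.map _ List.filter_sublist))
      · intro str
        rw [pvMem_lex, hmem str]
    · exact List.pairwise_map.mpr ((pvLex_entries.1).sublist List.filter_sublist)
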